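-- pv_equiv track=rewrite | github.com/knowgyu/problem-solving | 백준/Silver/1213. 팰린드롬 만들기/팰린드롬 만들기.py | solve
-- ===== SOURCE A (Python) =====
-- from collections import deque
--
-- def solve(s):
--     uniq = set(s)
--
--     uniq_count = {} # {'A':2} {'B':2}처럼 되어있음
--     cnt = 0
--
--     odd_char = None
--     for c in uniq:
--         uniq_count[c] =s.count(c)
--         if uniq_count[c] % 2 == 1:
--             odd_char = c
--             cnt += 1
--             if cnt>=2:
--                 return "I'm Sorry Hansoo"
--
--     else:
--         uniq_count = dict(sorted(uniq_count.items(), reverse=True))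
--
--     if odd_char:    # 홀수개수인 애가 있으면 걔가 무조건 가운데로
--         ans = deque()
--         ans.append(f"{odd_char}")
--         for char, num in uniq_count.items():
--             for _ in range(num // 2):  # 2면 1번만 실행
--                 ans.appendleft(char)
--                 ans.append(char)
--
--     else:           # 홀수개수 없으면 그냥 하면 됨.
--         ans = deque()
--
--         for char, num in uniq_count.items():
--             for _ in range(num//2): # 2면 1번만 실행
--                 ans.appendleft(char)
--                 ans.append(char)
--
--
--     anstr = ""
--     while ans:
--         c = ans.popleft()
--         anstr+=c
--     return anstr
-- ===== SOURCE B (Python) =====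
-- from collections import Counter
--
-- def solve(s):
--     counts = Counter(s)
--     odds = [c for c in counts if counts[c] % 2 == 1]
--     if len(odds) >= 2:
--         return "I'm Sorry Hansoo"
--     half = ''.join(c * (counts[c] // 2) for c in sorted(counts))
--     mid = odds[0] if odds else ''
--     return half + mid + half[::-1]
-- ===== Notes on version B (the rewrite author's own statement) =====
-- stated objective: simpler
-- what changed: Replaces the set-iteration + s.count dict, descending pair-sort and symmetric deque appendleft/append construction with a Counter, an ascending key sort and a build-half-then-mirror string (half + odd_center + reversed half).
import Mathlib
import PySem

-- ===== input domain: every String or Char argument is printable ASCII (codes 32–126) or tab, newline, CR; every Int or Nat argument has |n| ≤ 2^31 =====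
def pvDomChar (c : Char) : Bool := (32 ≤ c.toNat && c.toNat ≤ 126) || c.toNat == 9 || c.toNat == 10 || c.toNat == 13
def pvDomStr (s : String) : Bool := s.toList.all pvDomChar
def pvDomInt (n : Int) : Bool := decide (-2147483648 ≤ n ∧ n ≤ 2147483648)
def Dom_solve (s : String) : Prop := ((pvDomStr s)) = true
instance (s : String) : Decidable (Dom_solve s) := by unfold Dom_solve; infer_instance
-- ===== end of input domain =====

-- B builds the ascending half of the palindrome and mirrors it instead of A's descending
-- pair-sort with a symmetric deque; same return value, simpler decomposition (objective: simpler).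

-- ===== PORT A =====
-- set(s) is iterated in first-occurrence order (PySem.Set.ofList); the returned value does
-- not depend on the iteration order (the sorry-return fires on the second odd count no matter
-- the order, and otherwise the odd character is unique and the dict is re-sorted).
-- the 'for c in uniq' loop with its early 'return' (none = the sorry-return was taken)
def solveCountLoop (s : List Char) : List Char → PySem.Dict Char Int → Int → Option Char →
    Option (PySem.Dict Char Int × Option Char)
  | [], uc, _cnt, odd => some (uc, odd)
  | c :: rest, uc, cnt, odd =>
    let n : Int := (PySem.List.count s c : Int)
    let uc' := uc.insert c n
    if PySem.Int.mod n 2 == 1 then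
      if cnt + 1 ≥ 2 then none
      else solveCountLoop s rest uc' (cnt + 1) (some c)
    else solveCountLoop s rest uc' cnt odd

-- 'for _ in range(num // 2): ans.appendleft(char); ans.append(char)' — the deque is the
-- List Char d (appendleft = cons, append = ++ [·])
def solveInner (c : Char) : Nat → List Char → List Char
  | 0, d => d
  | k + 1, d => solveInner c k ((c :: d) ++ [c])

-- 'for char, num in uniq_count.items(): …'
def solveDeque : List (Char × Int) → List Char → List Char
  | [], d => d
  | (c, n) :: rest, d => solveDeque rest (solveInner c (PySem.Int.floordiv n 2).toNat d)

-- 'while ans: anstr += ans.popleft()' — anstr kept as its list of characters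
def solveDrain : List Char → List Char → List Char
  | [], acc => acc
  | c :: rest, acc => solveDrain rest (acc ++ [c])

def solve (s : String) : String :=
  let uniq : PySem.Set Char := PySem.Set.ofList s.toList
  match solveCountLoop s.toList uniq PySem.Dict.empty 0 none with
  | none => "I'm Sorry Hansoo"
  | some (uc, oddChar) =>
    -- dict(sorted(uniq_count.items(), reverse=True)) — tuple sort on (key, value) pairs
    let uc2 : PySem.Dict Char Int :=
      PySem.Dict.ofList (PySem.List.sorted2 uc.items Prod.fst Prod.snd true)
    let ans : List Char :=
      match oddChar with
      | some c => solveDeque uc2.items [c]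
      | none => solveDeque uc2.items []
    String.ofList (solveDrain ans [])

-- ===== PORT B =====
-- Counter(s); one comprehension over its keys picks the odd-count characters; half built by
-- ''.join(c * (counts[c] // 2) for c in sorted(counts)); half[::-1] is the list reversal
def solve_alt (s : String) : String :=
  let counts := PySem.Dict.counter s.toList
  let odds := counts.keys.filter (fun c => PySem.Int.mod (counts.getD c 0) 2 == 1)
  if odds.length ≥ 2 then "I'm Sorry Hansoo"
  else
    let half : List Char := (PySem.List.sorted counts.keys (fun c => c)).flatMap
      (fun c => PySem.List.pyRepeat [c] (PySem.Int.floordiv (counts.getD c 0) 2))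
    let mid : List Char := match odds with | [] => [] | c :: _ => [c]
    String.ofList (half ++ mid ++ half.reverse)

-- ===== PRECONDITION & SPEC =====
def Spec_solve (s : String) (out : String) : Prop := out = solve_alt s
instance (s : String) (out : String) : Decidable (Spec_solve s out) := by unfold Spec_solve; infer_instance

-- ===== CLAIM (what is proved, stated in full; the proofs are below) =====
def Claim_equal_solve : Prop := ∀ (s : String), Dom_solve s → Spec_solve s (solve s)


-- ===== LEMMAS AND PROOFS =====

-- the counting loop of A: returns none iff a second odd count is found; otherwise the dict of
-- all counts and the last (= only, when it returns some) odd-count character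
theorem solveCountLoop_eq (s : List Char) :
    ∀ (l : List Char) (uc : PySem.Dict Char Int) (cnt : Int) (odd : Option Char), 0 ≤ cnt → cnt ≤ 1 →
    solveCountLoop s l uc cnt odd =
      (if 2 ≤ cnt + (l.countP (fun c => PySem.Int.mod ((PySem.List.count s c : Int)) 2 == 1) : Int)
       then none
       else some (l.foldl (fun d c => d.insert c (PySem.List.count s c : Int)) uc,
         ((l.filter (fun c => PySem.Int.mod ((PySem.List.count s c : Int)) 2 == 1)).getLast?).or odd)) := by
  intro l
  induction l with
  | nil =>
    intro uc cnt odd h0 hcnt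
    simp [solveCountLoop]
    omega
  | cons c rest ih =>
    intro uc cnt odd h0 hcnt
    by_cases hp : (PySem.Int.mod ((PySem.List.count s c : Int)) 2 == 1) = true
    · by_cases h2 : (2 : Int) ≤ cnt + 1
      · have hstep : solveCountLoop s (c :: rest) uc cnt odd = none := by
          simp only [solveCountLoop]
          rw [if_pos hp, if_pos h2]
        have hc : 2 ≤ cnt + (((c :: rest).countP (fun c => PySem.Int.mod ((PySem.List.count s c : Int)) 2 == 1)) : Int) := by
          rw [List.countP_cons]
          simp only [hp, if_pos]
          push_cast
          omega
        rw [hstep, if_pos hc]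
      · have hstep : solveCountLoop s (c :: rest) uc cnt odd =
            solveCountLoop s rest (uc.insert c (PySem.List.count s c : Int)) (cnt + 1) (some c) := by
          simp only [solveCountLoop]
          rw [if_pos hp, if_neg h2]
        rw [hstep, ih _ _ _ (by omega) (by omega)]
        simp only [List.countP_cons, List.filter_cons, hp, if_pos, List.foldl_cons]
        have hcond : (2 ≤ cnt + 1 + (rest.countP (fun c => PySem.Int.mod ((PySem.List.count s c : Int)) 2 == 1) : Int))
            ↔ (2 ≤ cnt + ((rest.countP (fun c => PySem.Int.mod ((PySem.List.count s c : Int)) 2 == 1) + 1 : Nat) : Int)) := by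
          push_cast; omega
        by_cases hC : 2 ≤ cnt + 1 + (rest.countP (fun c => PySem.Int.mod ((PySem.List.count s c : Int)) 2 == 1) : Int)
        · rw [if_pos hC, if_pos (hcond.mp hC)]
        · rw [if_neg hC, if_neg (fun h => hC (hcond.mpr h))]
          have hzero : rest.countP (fun c => PySem.Int.mod ((PySem.List.count s c : Int)) 2 == 1) = 0 := by omega
          have hfil : rest.filter (fun c => PySem.Int.mod ((PySem.List.count s c : Int)) 2 == 1) = [] := by
            rw [← List.length_eq_zero_iff, ← List.countP_eq_length_filter, hzero]
          rw [hfil]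
          simp
    · have hstep : solveCountLoop s (c :: rest) uc cnt odd =
          solveCountLoop s rest (uc.insert c (PySem.List.count s c : Int)) cnt odd := by
        simp only [solveCountLoop]
        rw [if_neg hp]
      rw [hstep, ih _ _ _ h0 hcnt]
      simp only [List.countP_cons, List.filter_cons, hp, List.foldl_cons]
      simp

theorem replicate_append_cons {a : Type} (m : Nat) (c : a) (Y : List a) :
    List.replicate m c ++ c :: Y = c :: (List.replicate m c ++ Y) := by
  induction m with
  | zero => rfl
  | succ k ih => simp [List.replicate_succ, ih]

-- ans.appendleft(char); ans.append(char), num//2 times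
theorem solveInner_eq (c : Char) : ∀ (k : Nat) (d : List Char),
    solveInner c k d = List.replicate k c ++ d ++ List.replicate k c := by
  intro k
  induction k with
  | zero => intro d; simp [solveInner]
  | succ m ih =>
    intro d
    rw [solveInner, ih]
    simp [List.replicate_succ, List.append_assoc, replicate_append_cons]

-- the deque after the item loop: prepended halves on the left, appended halves on the right
theorem solveDeque_eq : ∀ (L : List (Char × Int)) (d : List Char),
    solveDeque L d =
      (L.reverse.flatMap (fun p => List.replicate (PySem.Int.floordiv p.2 2).toNat p.1)) ++ d ++
      (L.flatMap (fun p => List.replicate (PySem.Int.floordiv p.2 2).toNat p.1)) := by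
  intro L
  induction L with
  | nil => intro d; simp [solveDeque]
  | cons p rest ih =>
    intro d
    obtain ⟨c, n⟩ := p
    rw [solveDeque, ih, solveInner_eq]
    simp [List.append_assoc]

theorem solveDrain_eq : ∀ (l acc : List Char), solveDrain l acc = acc ++ l := by
  intro l
  induction l with
  | nil => intro acc; simp [solveDrain]
  | cons c rest ih => intro acc; rw [solveDrain, ih]; simp

-- insertBy only compares the inserted element with list elements
theorem insertBy_congr {a : Type} (f g : a → a → Bool) (x : a) :
    ∀ (ys : List a), (∀ y ∈ ys, f x y = g x y) →
    PySem.List.insertBy f x ys = PySem.List.insertBy g x ys := by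
  intro ys
  induction ys with
  | nil => intro _; rfl
  | cons y t ih =>
    intro h
    simp only [PySem.List.insertBy]
    rw [h y (by simp), ih (fun z hz => h z (by simp [hz]))]

theorem foldl_insertBy_congr {a : Type} (f g : a → a → Bool) :
    ∀ (l acc : List a), (∀ x ∈ l, ∀ y, y ∈ l ∨ y ∈ acc → f x y = g x y) →
    l.foldl (fun acc x => PySem.List.insertBy f x acc) acc =
      l.foldl (fun acc x => PySem.List.insertBy g x acc) acc := by
  intro l
  induction l with
  | nil => intro acc _; rfl
  | cons x t ih =>
    intro acc h
    simp only [List.foldl_cons]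
    rw [insertBy_congr f g x acc (fun y hy => h x (by simp) y (Or.inr hy))]
    apply ih
    intro z hz y hy
    apply h z (by simp [hz])
    rcases hy with h1 | h1
    · exact Or.inl (by simp [h1])
    · rcases (PySem.List.mem_insertBy g x y acc).mp h1 with h2 | h2
      · exact Or.inl (by simp [h2])
      · exact Or.inr h2

-- on pairs whose first components determine them, Python's descending tuple sort is the
-- descending sort by first component
theorem sorted2_eq_sorted_fst (M : List (Char × Int))
    (h : ∀ x ∈ M, ∀ y ∈ M, x.1 = y.1 → x = y) :
    PySem.List.sorted2 M Prod.fst Prod.snd true = PySem.List.sorted M Prod.fst true := by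
  show M.foldl (fun acc x => PySem.List.insertBy
      (fun a b => decide (b.1 < a.1) || (!decide (a.1 < b.1) && decide (b.2 < a.2))) x acc) []
    = M.foldl (fun acc x => PySem.List.insertBy (fun a b => decide (b.1 < a.1)) x acc) []
  apply foldl_insertBy_congr
  intro x hx y hy0
  have hy : y ∈ M := by
    rcases hy0 with h1 | h1
    · exact h1
    · simp at h1
  rcases lt_trichotomy x.1 y.1 with h1 | h1 | h1
  · simp [h1, lt_asymm h1]
  · have := h x hx y hy h1
    subst this
    simp
  · simp [h1, lt_asymm h1]

theorem solve_spec : Claim_equal_solve := by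
  intro s _
  unfold Spec_solve
  have hrw := solveCountLoop_eq s.toList (PySem.Set.ofList s.toList) PySem.Dict.empty 0 none
    (by omega) (by omega)
  rw [List.countP_eq_length_filter] at hrw
  have hodds : ((PySem.Dict.counter s.toList).keys.filter
        (fun c => PySem.Int.mod ((PySem.Dict.counter s.toList).getD c 0) 2 == 1))
      = (PySem.Set.ofList s.toList).filter
        (fun c => PySem.Int.mod ((PySem.List.count s.toList c : Int)) 2 == 1) := by
    rw [PySem.Dict.keys_counter]
    apply List.filter_congr
    intro c _
    rw [PySem.Dict.getD_counter, PySem.List.count_eq]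
  -- the dict after the counting loop, as a map over the deduplicated characters
  have hM : ((PySem.Set.ofList s.toList).foldl
        (fun d c => d.insert c ((PySem.List.count s.toList c : Int))) PySem.Dict.empty).items
      = (PySem.Set.ofList s.toList).map (fun c => (c, (PySem.List.count s.toList c : Int))) := by
    have := PySem.Dict.items_foldl_insert_fresh (PySem.Set.ofList s.toList) (fun c => c)
      (fun c => (PySem.List.count s.toList c : Int)) PySem.Dict.empty
      (fun a _ => PySem.Dict.contains_empty a)
      (by simpa using PySem.Set.nodup_ofList s.toList)
    simpa using this
  -- Python's descending tuple sort of the items = the ascending sort of the keys, reversed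
  have hsort : PySem.List.sorted2
        ((PySem.Set.ofList s.toList).map (fun c => (c, (PySem.List.count s.toList c : Int))))
        Prod.fst Prod.snd true
      = (((PySem.List.sorted (PySem.Set.ofList s.toList) (fun c => c)).map
          (fun c => (c, (PySem.List.count s.toList c : Int))))).reverse := by
    rw [sorted2_eq_sorted_fst]
    · apply PySem.List.sorted_rev_eq_of_perm_of_pairwise_gt
      · exact (List.reverse_perm _).trans
          ((PySem.List.sorted_perm (PySem.Set.ofList s.toList) (fun c => c) false).map _)
      · rw [List.pairwise_reverse, List.pairwise_map]
        exact PySem.List.sorted_ofList_pairwise_lt s.toList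
    · intro x hx y hy hxy
      obtain ⟨cx, _, rfl⟩ := List.mem_map.mp hx
      obtain ⟨cy, _, rfl⟩ := List.mem_map.mp hy
      simp_all
  -- re-listing the sorted pairs through dict(...) keeps them unchanged (keys are distinct)
  have hit : (PySem.Dict.ofList
        ((((PySem.List.sorted (PySem.Set.ofList s.toList) (fun c => c)).map
          (fun c => (c, (PySem.List.count s.toList c : Int))))).reverse)).items
      = (((PySem.List.sorted (PySem.Set.ofList s.toList) (fun c => c)).map
          (fun c => (c, (PySem.List.count s.toList c : Int))))).reverse := by
    have hnd : ((((PySem.List.sorted (PySem.Set.ofList s.toList) (fun c => c)).map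
        (fun c => (c, (PySem.List.count s.toList c : Int))))).reverse.map Prod.fst).Nodup := by
      have base : ((PySem.List.sorted (PySem.Set.ofList s.toList) (fun c => c)).reverse).Nodup :=
        List.nodup_reverse.mpr
          (((PySem.List.sorted_perm (PySem.Set.ofList s.toList) (fun c => c) false).nodup_iff).mpr
            (PySem.Set.nodup_ofList s.toList))
      simpa [List.map_reverse, List.map_map, Function.comp_def] using base
    have := PySem.Dict.items_foldl_insert_fresh
      ((((PySem.List.sorted (PySem.Set.ofList s.toList) (fun c => c)).map
        (fun c => (c, (PySem.List.count s.toList c : Int))))).reverse)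
      Prod.fst Prod.snd PySem.Dict.empty (fun a _ => PySem.Dict.contains_empty a.1) hnd
    simpa [PySem.Dict.ofList, PySem.Dict.update] using this
  -- the deque loop over the reversed sorted pairs builds half ++ center ++ reversed half
  have hdq : ∀ init : List Char,
      solveDrain (solveDeque
        ((((PySem.List.sorted (PySem.Set.ofList s.toList) (fun c => c)).map
          (fun c => (c, (PySem.List.count s.toList c : Int))))).reverse) init) []
      = ((PySem.List.sorted (PySem.Set.ofList s.toList) (fun c => c)).flatMap
          (fun c => List.replicate (PySem.Int.floordiv ((PySem.List.count s.toList c : Int)) 2).toNat c))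
        ++ init ++
        ((PySem.List.sorted (PySem.Set.ofList s.toList) (fun c => c)).flatMap
          (fun c => List.replicate (PySem.Int.floordiv ((PySem.List.count s.toList c : Int)) 2).toNat c)).reverse := by
    intro init
    rw [solveDeque_eq, solveDrain_eq, List.nil_append, List.reverse_reverse, List.flatMap_map,
      List.reverse_flatMap, ← List.map_reverse, List.flatMap_map]
    simp [Function.comp_def, List.reverse_replicate]
  -- B's half, rewritten to the same flatMap
  have hhalf : ((PySem.List.sorted (PySem.Dict.counter s.toList).keys (fun c => c)).flatMap
        (fun c => PySem.List.pyRepeat [c] (PySem.Int.floordiv ((PySem.Dict.counter s.toList).getD c 0) 2)))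
      = ((PySem.List.sorted (PySem.Set.ofList s.toList) (fun c => c)).flatMap
          (fun c => List.replicate (PySem.Int.floordiv ((PySem.List.count s.toList c : Int)) 2).toNat c)) := by
    rw [PySem.Dict.keys_counter]
    simp [PySem.Dict.getD_counter, PySem.List.pyRepeat_singleton, PySem.List.count_eq]
  simp only [solve, solve_alt]
  rw [hrw, hodds]
  by_cases hC : 2 ≤ ((PySem.Set.ofList s.toList).filter
      (fun c => PySem.Int.mod ((PySem.List.count s.toList c : Int)) 2 == 1)).length
  · rw [if_pos (by omega)]
    rw [if_pos (by omega)]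
  · rw [if_neg (by omega)]
    rw [if_neg (by omega)]
    have hlen : ((PySem.Set.ofList s.toList).filter
        (fun c => PySem.Int.mod ((PySem.List.count s.toList c : Int)) 2 == 1)).length ≤ 1 := by omega
    cases hfl : ((PySem.Set.ofList s.toList).filter
        (fun c => PySem.Int.mod ((PySem.List.count s.toList c : Int)) 2 == 1)) with
    | nil =>
      simp only [List.getLast?_nil, Option.or_none]
      rw [hM, hsort, hit, hdq, hhalf]
    | cons x rest =>
      have hrest : rest = [] := by
        rw [hfl] at hlen
        simp only [List.length_cons] at hlen
        exact List.length_eq_zero_iff.mp (by omega)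
      subst hrest
      simp only [List.getLast?_singleton, Option.or_none]
      rw [hM, hsort, hit, hdq, hhalf]
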